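-- pv_equiv track=rewrite | github.com/Radiology-LREC-Coling2024/co-train | data_utils.py | impressions_ind
-- ===== SOURCE A (Python) =====
-- def impressions_ind(report):
--     # impressions section is sometimes called different words, we must check if any of these words exist in the text and the smallest index of it
--     loi = [
--         report.lower().find("impression"),
--         report.lower().find("opinion"),
--         report.lower().find("summary"),
--         report.lower().find("conclusion"),
--         report.lower().find("interpretation"),
--     ]
--     if len(set(loi)) == 1:
--         return -1
--     else:
--         loi = [i for i in loi if i != -1]
--         return min(loi)
-- ===== SOURCE B (Python) =====
-- KEYWORDS = ("impression", "opinion", "summary", "conclusion", "interpretation")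
--
-- def impressions_ind(report):
--     # single left-to-right scan: first position where any keyword starts
--     text = report.lower()
--     for i in range(len(text)):
--         if any(text.startswith(kw, i) for kw in KEYWORDS):
--             return i
--     return -1
-- ===== Notes on version B (the rewrite author's own statement) =====
-- stated objective: alternative
-- what changed: Replaces five separate lower().find() passes plus set/min filtering with one left-to-right scan that returns the first position where any keyword starts.
import Mathlib
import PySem

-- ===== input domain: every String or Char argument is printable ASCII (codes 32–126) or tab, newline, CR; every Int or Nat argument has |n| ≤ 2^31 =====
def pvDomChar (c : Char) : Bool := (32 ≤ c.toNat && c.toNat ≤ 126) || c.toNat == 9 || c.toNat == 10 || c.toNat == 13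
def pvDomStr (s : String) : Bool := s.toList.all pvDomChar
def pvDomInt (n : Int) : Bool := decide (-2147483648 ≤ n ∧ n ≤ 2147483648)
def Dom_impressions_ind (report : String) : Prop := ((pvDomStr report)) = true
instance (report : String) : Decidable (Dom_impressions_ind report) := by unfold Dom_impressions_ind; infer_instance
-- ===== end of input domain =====

-- B replaces A's five lower().find() passes plus set/min filtering by a single left-to-right
-- scan returning the first position where any keyword starts (alternative decomposition, same cost).


-- ===== PORT A =====
def impressions_ind (report : String) : Int :=
  let loi : List Int :=
    [PySem.Str.find (PySem.Str.lower report) "impression",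
     PySem.Str.find (PySem.Str.lower report) "opinion",
     PySem.Str.find (PySem.Str.lower report) "summary",
     PySem.Str.find (PySem.Str.lower report) "conclusion",
     PySem.Str.find (PySem.Str.lower report) "interpretation"]
  if PySem.Set.len (PySem.Set.ofList loi) = 1 then -1
  else
    let loi2 := loi.filter (fun i => i ≠ -1)
    -- min(loi2); the `none` branch is unreachable: loi2 is nonempty whenever the set check fails
    (PySem.List.min? loi2 (fun x => x)).getD (-1)

-- ===== PORT B =====
def pvKeywords : List (List Char) :=
  ["impression".toList, "opinion".toList, "summary".toList, "conclusion".toList,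
   "interpretation".toList]

-- any(text.startswith(kw, i) for kw in KEYWORDS), with text.drop i as the argument
def pvHit (t : List Char) : Bool := pvKeywords.any (fun kw => PySem.Chars.startswith t kw)

-- the 'for i in range(len(text))' scan, as structural recursion over the suffixes
def pvScan : List Char → Int
  | [] => -1
  | c :: rest =>
    if pvHit (c :: rest) then 0
    else
      let r := pvScan rest
      if r = -1 then -1 else r + 1

def impressions_ind_alt (report : String) : Int :=
  pvScan (PySem.Str.lower report).toList

-- ===== PRECONDITION & SPEC =====
def Spec_impressions_ind (report : String) (out : Int) : Prop := out = impressions_ind_alt report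
instance (report : String) (out : Int) : Decidable (Spec_impressions_ind report out) := by unfold Spec_impressions_ind; infer_instance

-- ===== CLAIM (what is proved, stated in full; the proofs are below) =====
def Claim_equal_impressions_ind : Prop := ∀ (report : String), Dom_impressions_ind report → Spec_impressions_ind report (impressions_ind report)

-- ===== LEMMAS AND PROOFS =====

lemma pvHit_iff (t : List Char) : pvHit t = true ↔ ∃ kw ∈ pvKeywords, kw <+: t := by
  simp [pvHit, List.any_eq_true, PySem.Chars.startswith_iff]

lemma pvScan_neg (cs : List Char) (h : ∀ i, pvHit (cs.drop i) = false) : pvScan cs = -1 := by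
  induction cs with
  | nil => rfl
  | cons c rest ih =>
    have h0 : pvHit (c :: rest) = false := by simpa using h 0
    have ih' : pvScan rest = -1 := ih (fun i => by simpa using h (i + 1))
    simp [pvScan, h0, ih']

lemma pvScan_eq_of (cs : List Char) : ∀ (m : Nat), pvHit (cs.drop m) = true →
    (∀ i < m, pvHit (cs.drop i) = false) → pvScan cs = (m : Int) := by
  induction cs with
  | nil =>
    intro m hp _
    simp only [List.drop_nil] at hp
    exact absurd hp (by decide)
  | cons c rest ih =>
    intro m hp hlt
    by_cases hh : pvHit (c :: rest) = true
    · cases m with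
      | zero => simp [pvScan, hh]
      | succ k =>
        have h0 : pvHit (c :: rest) = false := by simpa using hlt 0 (Nat.succ_pos _)
        simp [h0] at hh
    · cases m with
      | zero => simp only [List.drop_zero] at hp; exact absurd hp hh
      | succ k =>
        have hp' : pvHit (rest.drop k) = true := by simpa using hp
        have hlt' : ∀ i < k, pvHit (rest.drop i) = false := fun i hi => by
          simpa using hlt (i + 1) (by omega)
        have ihk := ih k hp' hlt'
        have hk : (k : Int) ≠ -1 := by omega
        simp [pvScan, hh, ihk, hk]

lemma set_len_one_all_eq {xs : List Int} (h : PySem.Set.len (PySem.Set.ofList xs) = 1) :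
    ∀ a ∈ xs, ∀ b ∈ xs, a = b := by
  have hlen : (PySem.Set.ofList xs).length = 1 := by simpa [PySem.Set.len] using h
  obtain ⟨x, hx⟩ := List.length_eq_one_iff.mp hlen
  intro a ha b hb
  have ha' : a ∈ PySem.Set.ofList xs := (PySem.Set.mem_ofList _ _).mpr ha
  have hb' : b ∈ PySem.Set.ofList xs := (PySem.Set.mem_ofList _ _).mpr hb
  rw [hx] at ha' hb'
  simp at ha' hb'
  omega

lemma hit_find_le (s : List Char) (i : Nat) (h : pvHit (s.drop i) = true) :
    ∃ kw ∈ pvKeywords, PySem.Chars.find s kw ≠ -1 ∧ (PySem.Chars.find s kw).toNat ≤ i := by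
  obtain ⟨kw, hmem, hpre⟩ := (pvHit_iff _).mp h
  have hin : PySem.Chars.isIn kw s = true :=
    (PySem.Chars.exists_prefix_drop_iff_isIn kw s).mp ⟨i, hpre⟩
  have hne : PySem.Chars.find s kw ≠ -1 :=
    (PySem.Chars.find_ne_neg_one_iff s kw).mpr ((PySem.Chars.isIn_iff_infix kw s).mp hin)
  have h0 : 0 ≤ PySem.Chars.find s kw := by
    have := PySem.Chars.neg_one_le_find s kw; omega
  refine ⟨kw, hmem, hne, ?_⟩
  by_contra hgt
  push Not at hgt
  exact ((PySem.Chars.find_spec h0).2 i hgt) hpre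

lemma find_hit (s kw : List Char) (hmem : kw ∈ pvKeywords)
    (h0 : 0 ≤ PySem.Chars.find s kw) :
    pvHit (s.drop (PySem.Chars.find s kw).toNat) = true :=
  (pvHit_iff _).mpr ⟨kw, hmem, (PySem.Chars.find_spec h0).1⟩

lemma A_eq_scan (s : List Char) :
    (if PySem.Set.len (PySem.Set.ofList
        [PySem.Chars.find s "impression".toList, PySem.Chars.find s "opinion".toList,
         PySem.Chars.find s "summary".toList, PySem.Chars.find s "conclusion".toList,
         PySem.Chars.find s "interpretation".toList]) = 1 then (-1 : Int)
     else (PySem.List.min?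
        (([PySem.Chars.find s "impression".toList, PySem.Chars.find s "opinion".toList,
           PySem.Chars.find s "summary".toList, PySem.Chars.find s "conclusion".toList,
           PySem.Chars.find s "interpretation".toList].filter (fun i => i ≠ -1)))
        (fun x => x)).getD (-1)) = pvScan s := by
  set L : List Int :=
    [PySem.Chars.find s "impression".toList, PySem.Chars.find s "opinion".toList,
     PySem.Chars.find s "summary".toList, PySem.Chars.find s "conclusion".toList,
     PySem.Chars.find s "interpretation".toList] with hL
  have hmemL : ∀ x, x ∈ L ↔ ∃ kw ∈ pvKeywords, PySem.Chars.find s kw = x := by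
    intro x
    simp [hL, pvKeywords]
    tauto
  by_cases hall : ∀ kw ∈ pvKeywords, PySem.Chars.find s kw = -1
  · have h1 := hall "impression".toList (by simp [pvKeywords])
    have h2 := hall "opinion".toList (by simp [pvKeywords])
    have h3 := hall "summary".toList (by simp [pvKeywords])
    have h4 := hall "conclusion".toList (by simp [pvKeywords])
    have h5 := hall "interpretation".toList (by simp [pvKeywords])
    have hL1 : L = [-1, -1, -1, -1, -1] := by rw [hL, h1, h2, h3, h4, h5]
    rw [hL1, if_pos (by decide)]
    refine (pvScan_neg s ?_).symm
    intro i
    by_contra hcon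
    obtain ⟨kw, hkwmem, hne, -⟩ := hit_find_le s i (by simpa using hcon)
    exact hne (hall kw hkwmem)
  · push Not at hall
    obtain ⟨kw0, hkw0, hne0⟩ := hall
    have hmem0 : PySem.Chars.find s kw0 ∈ L := (hmemL _).mpr ⟨kw0, hkw0, rfl⟩
    have hmemf : PySem.Chars.find s kw0 ∈ L.filter (fun i => i ≠ -1) := by
      simp [List.mem_filter, hne0]
      exact hmem0
    cases hmin : PySem.List.min? (L.filter (fun i => i ≠ -1)) (fun x => x) with
    | none =>
      exact absurd ((PySem.List.min?_eq_none_iff _ _).mp hmin)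
        (List.ne_nil_of_mem hmemf)
    | some m =>
      have hmM := PySem.List.min?_mem hmin
      have hmL : m ∈ L ∧ m ≠ -1 := by simpa [List.mem_filter] using hmM
      have hmin_le : ∀ y ∈ L, y ≠ -1 → m ≤ y := by
        intro y hy hyne
        exact PySem.List.min?_isMin hmin y (by simp [List.mem_filter, hyne, hy])
      obtain ⟨kw1, hkw1, hfind1⟩ := (hmemL m).mp hmL.1
      have hm0 : 0 ≤ m := by
        have := PySem.Chars.neg_one_le_find s kw1
        omega
      have hset : ¬ PySem.Set.len (PySem.Set.ofList L) = 1 := by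
        intro h1
        have hallq := set_len_one_all_eq h1
        have himp : PySem.Chars.find s "impression".toList ∈ L := by simp [hL]
        have hop : PySem.Chars.find s "opinion".toList ∈ L := by simp [hL]
        have he1 : PySem.Chars.find s "impression".toList = m := hallq _ himp _ hmL.1
        have he2 : PySem.Chars.find s "opinion".toList = m := hallq _ hop _ hmL.1
        have hp1 := (PySem.Chars.find_spec (s := s) (sub := "impression".toList)
          (by rw [he1]; exact hm0)).1
        have hp2 := (PySem.Chars.find_spec (s := s) (sub := "opinion".toList)
          (by rw [he2]; exact hm0)).1
        rw [he1] at hp1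
        rw [he2] at hp2
        rcases List.prefix_or_prefix_of_prefix hp1 hp2 with hc | hc <;> revert hc <;> decide
      rw [if_neg hset]
      have hp : pvHit (s.drop m.toNat) = true := by
        rw [← hfind1]
        exact find_hit s kw1 hkw1 (by rw [hfind1]; exact hm0)
      have hlt : ∀ i < m.toNat, pvHit (s.drop i) = false := by
        intro i hi
        by_contra hcon
        obtain ⟨kw, hkwmem, hne, hle⟩ := hit_find_le s i (by simpa using hcon)
        have hmle : m ≤ PySem.Chars.find s kw :=
          hmin_le _ ((hmemL _).mpr ⟨kw, hkwmem, rfl⟩) hne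
        have := Int.toNat_le_toNat hmle
        omega
      rw [pvScan_eq_of s m.toNat hp hlt]
      simp [Int.toNat_of_nonneg hm0]

theorem impressions_ind_spec : Claim_equal_impressions_ind := by
  intro report _
  unfold Spec_impressions_ind impressions_ind impressions_ind_alt
  simp only [PySem.Str.find_eq]
  exact A_eq_scan (PySem.Str.lower report).toList
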